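-- pv_equiv track=rewrite | github.com/Doodlydiddle/Snake-in-a-Box | snake-in-a-box.py | snake
-- ===== SOURCE A (Python) =====
-- def hamming_distance(num1, num2):
--     return bin(num1 ^ num2).count('1')
--
-- def adjacent(num1, num2):
--     return True if hamming_distance(num1, num2) == 1 else False
--
-- def snake(snake_stack, rem_nodes, removals):
--     rem_nodes = [node for node in rem_nodes if node not in removals]
--     head = snake_stack[-1]
--     adj_nodes = [node for node in rem_nodes if adjacent(head, node)]
--     if not adj_nodes:
--         return len(snake_stack) - 1
--     else:
--         return max([snake(snake_stack + [node], rem_nodes, adj_nodes) for node in adj_nodes])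
-- ===== SOURCE B (Python) =====
-- def hamming_distance(num1, num2):
--     return bin(num1 ^ num2).count('1')
--
-- def adjacent(num1, num2):
--     return True if hamming_distance(num1, num2) == 1 else False
--
-- def snake(snake_stack, rem_nodes, removals):
--     # iterative DFS with an explicit frame stack and a running best depth
--     avail = [node for node in rem_nodes if node not in removals]
--     head = snake_stack[-1]
--     best = len(snake_stack) - 1
--     stack = [(head, avail, best)]
--     while stack:
--         head, avail, depth = stack.pop()
--         adj = [node for node in avail if adjacent(head, node)]
--         if not adj:
--             best = max(best, depth)
--         else:
--             new_avail = [node for node in avail if node not in adj]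
--             for node in adj:
--                 stack.append((node, new_avail, depth + 1))
--     return best
-- ===== Notes on version B (the rewrite author's own statement) =====
-- stated objective: alternative
-- what changed: Replaced the recursive max-over-children search that rebuilds snake_stack at every call with an iterative DFS over an explicit frame stack (head, available nodes, depth) that keeps a single running best depth.
import Mathlib
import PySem

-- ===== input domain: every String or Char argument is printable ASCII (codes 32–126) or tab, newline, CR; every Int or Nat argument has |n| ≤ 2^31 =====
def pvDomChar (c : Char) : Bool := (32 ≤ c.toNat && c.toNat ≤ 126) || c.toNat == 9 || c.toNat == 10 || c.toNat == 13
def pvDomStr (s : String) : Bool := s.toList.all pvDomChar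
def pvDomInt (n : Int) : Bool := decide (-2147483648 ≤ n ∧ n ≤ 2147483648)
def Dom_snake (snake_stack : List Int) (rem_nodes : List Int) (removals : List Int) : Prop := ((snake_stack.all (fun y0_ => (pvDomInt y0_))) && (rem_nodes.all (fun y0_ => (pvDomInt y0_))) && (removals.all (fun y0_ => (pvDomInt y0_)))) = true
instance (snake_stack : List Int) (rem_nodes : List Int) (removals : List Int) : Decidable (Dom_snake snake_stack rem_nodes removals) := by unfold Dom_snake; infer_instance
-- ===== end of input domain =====

-- B replaces A's recursive max-over-children search by an iterative DFS over an explicit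
-- frame stack with a running best depth (objective: alternative decomposition, same cost).

-- ===== PORT A =====
-- hamming_distance(a, b) = bin(a ^ b).count('1'): bin counts the '1' digits of |a ^ b|,
-- which is exactly PySem.Int.bitCount of the Python-exact xor PySem.Int.bxor.
def pvAdjacent (num1 : Int) (num2 : Int) : Bool :=
  PySem.Int.bitCount (PySem.Int.bxor num1 num2) == 1

-- termination helpers, cited in the decreasing_by of the ports (proof obligations only)
theorem pvFilterNotMemLt (l adj : List Int) (hsub : ∀ a ∈ adj, a ∈ l) (hne : adj ≠ []) :
    (l.filter (fun n => !adj.contains n)).length < l.length := by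
  obtain ⟨a, ha⟩ := List.exists_mem_of_ne_nil adj hne
  apply List.length_filter_lt_length_iff_exists.mpr
  exact ⟨a, hsub a ha, by simp [ha]⟩

theorem pvFilterAttachUnattach {α : Type} (l : List α) (q : α → Bool) :
    (List.filter (fun (x : {y // y ∈ l}) => q x.1) l.attach).unattach = l.filter q := by
  rw [List.unattach, ← List.attach_map_subtype_val l, List.filter_map]
  simp [Function.comp]

theorem pvFilterSplitLen (l : List Int) (p : Int → Bool) :
    (l.filter fun m => !p m).length + (l.filter p).length = l.length := by
  induction l with
  | nil => rfl
  | cons a t ih => by_cases h : p a <;> simp [h] <;> omega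

theorem pvBranchLt (avail : List Int) (p : Int → Bool) (hne : avail.filter p ≠ []) :
    (avail.filter p).length * 2 ^ (avail.filter (fun n => !(avail.filter p).contains n)).length
      < 2 ^ avail.length := by
  have hcong : avail.filter (fun n => !(avail.filter p).contains n)
      = avail.filter (fun n => !p n) := by
    apply List.filter_congr; intro m hm; by_cases hp : p m <;> simp [List.mem_filter, hm, hp]
  rw [hcong]
  have hk1 : 1 ≤ (avail.filter p).length := List.length_pos_iff.mpr hne
  have hkle : (avail.filter p).length ≤ avail.length := List.length_filter_le _ _
  have hsum := pvFilterSplitLen avail p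
  calc (avail.filter p).length * 2 ^ (avail.filter fun n => !p n).length
      = (avail.filter p).length * 2 ^ (avail.length - (avail.filter p).length) := by
        rw [show (avail.filter fun n => !p n).length
            = avail.length - (avail.filter p).length by omega]
    _ < 2 ^ (avail.filter p).length * 2 ^ (avail.length - (avail.filter p).length) :=
        (Nat.mul_lt_mul_right (Nat.two_pow_pos _)).mpr Nat.lt_two_pow_self
    _ = 2 ^ avail.length := by rw [← pow_add]; congr 1; omega

def snake (snake_stack : List Int) (rem_nodes : List Int) (removals : List Int) : Int :=
  let rem := rem_nodes.filter (fun node => !removals.contains node)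
  match PySem.List.pyGet? snake_stack (-1) with
  | none => 0   -- snake_stack[-1] raises IndexError in Python; excluded by Pre_snake
  | some head =>
    let adj := rem.filter (fun node => pvAdjacent head node)
    if h : adj = [] then (snake_stack.length : Int) - 1
    else
      ((PySem.List.max? (adj.map (fun node =>
          snake (snake_stack ++ [node]) rem adj)) (fun y => y)).getD 0)
termination_by (rem_nodes.filter (fun node => !removals.contains node)).length
decreasing_by
  have e : (List.filter (fun (x : {y // y ∈ rem_nodes}) => !removals.contains x.1)
        rem_nodes.attach).unattach
      = rem_nodes.filter (fun node => !removals.contains node) :=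
    pvFilterAttachUnattach rem_nodes (fun n => !removals.contains n)
  have h' : (List.filter (fun (x : {y // y ∈ rem_nodes}) => !removals.contains x.1)
        rem_nodes.attach).unattach.filter (fun node => pvAdjacent head node) ≠ [] := h
  rw [e] at h' ⊢
  exact pvFilterNotMemLt _ _ (fun a ha => (List.mem_filter.mp ha).1) h'

-- ===== PORT B =====
-- the while loop of Source B; the Python list used as a stack (pop/append at the end) is
-- represented with its TOP as the list head, so the reversed new frames go to the front.
def snakeLoop (stack : List (Int × List Int × Int)) (best : Int) : Int :=
  match stack with
  | [] => best
  | (head, avail, depth) :: rest =>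
    let adj := avail.filter (fun node => pvAdjacent head node)
    if h : adj = [] then
      snakeLoop rest (max best depth)
    else
      let newAvail := avail.filter (fun node => !adj.contains node)
      snakeLoop ((adj.map (fun node => (node, newAvail, depth + 1))).reverse ++ rest) best
termination_by (stack.map (fun f => 2 ^ f.2.1.length)).sum
decreasing_by
  · simp
  · have e1 : (List.filter (fun (x : {y // y ∈ avail}) => pvAdjacent head x.1)
          avail.attach).unattach
        = avail.filter (fun node => pvAdjacent head node) :=
      pvFilterAttachUnattach avail (fun n => pvAdjacent head n)
    have h' : (List.filter (fun (x : {y // y ∈ avail}) => pvAdjacent head x.1)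
          avail.attach).unattach ≠ [] := h
    rw [e1] at h' ⊢
    have e2 : (List.filter (fun (x : {y // y ∈ avail}) =>
          !(avail.filter (fun node => pvAdjacent head node)).contains x.1)
          avail.attach).unattach
        = avail.filter (fun n =>
            !(avail.filter (fun node => pvAdjacent head node)).contains n) :=
      pvFilterAttachUnattach avail
        (fun n => !(avail.filter (fun node => pvAdjacent head node)).contains n)
    rw [e2]
    have key := pvBranchLt avail (fun node => pvAdjacent head node) h'
    simp only [List.map_append, List.sum_append, List.map_reverse, List.sum_reverse,
      List.map_map, List.map_cons, List.sum_cons]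
    have hconst : (List.map ((fun (f : Int × List Int × Int) => 2 ^ f.2.1.length) ∘
          (fun node => (node, avail.filter (fun n =>
            !(avail.filter (fun node => pvAdjacent head node)).contains n), depth + 1)))
          (avail.filter (fun node => pvAdjacent head node))).sum
        = (avail.filter (fun node => pvAdjacent head node)).length
          * 2 ^ (avail.filter (fun n =>
              !(avail.filter (fun node => pvAdjacent head node)).contains n)).length := by
      simp [Function.comp_def]
    rw [hconst]
    omega

def snake_alt (snake_stack : List Int) (rem_nodes : List Int) (removals : List Int) : Int :=
  let avail := rem_nodes.filter (fun node => !removals.contains node)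
  match PySem.List.pyGet? snake_stack (-1) with
  | none => 0   -- snake_stack[-1] raises IndexError in Python; excluded by Pre_snake
  | some head =>
    snakeLoop [(head, avail, (snake_stack.length : Int) - 1)] ((snake_stack.length : Int) - 1)

-- ===== PRECONDITION & SPEC =====
-- Pre_ excludes exactly the inputs with empty snake_stack, on which snake_stack[-1]
-- raises IndexError in both A and B.
def Pre_snake (snake_stack : List Int) (rem_nodes : List Int) (removals : List Int) : Prop :=
  snake_stack ≠ []
instance (snake_stack : List Int) (rem_nodes : List Int) (removals : List Int) : Decidable (Pre_snake snake_stack rem_nodes removals) := by unfold Pre_snake; infer_instance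
def pvWitness_snake : List Int × List Int × List Int := ([0], [1, 2, 3, 4], [4])

def Spec_snake (snake_stack : List Int) (rem_nodes : List Int) (removals : List Int) (out : Int) : Prop := out = snake_alt snake_stack rem_nodes removals
instance (snake_stack : List Int) (rem_nodes : List Int) (removals : List Int) (out : Int) : Decidable (Spec_snake snake_stack rem_nodes removals out) := by unfold Spec_snake; infer_instance

-- ===== CLAIM (what is proved, stated in full; the proofs are below) =====
def Claim_equal_snake : Prop := ∀ (snake_stack : List Int) (rem_nodes : List Int) (removals : List Int), Dom_snake snake_stack rem_nodes removals → Pre_snake snake_stack rem_nodes removals → Spec_snake snake_stack rem_nodes removals (snake snake_stack rem_nodes removals)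

-- ===== LEMMAS AND PROOFS =====

-- the longest extension depth reachable from `head` using the nodes of `avail`
def gsnake (head : Int) (avail : List Int) : Nat :=
  let adj := avail.filter (fun node => pvAdjacent head node)
  if h : adj = [] then 0
  else 1 + ((adj.map (fun node =>
      gsnake node (avail.filter (fun n => !adj.contains n)))).foldl max 0)
termination_by avail.length
decreasing_by
  have e1 : (List.filter (fun (x : {y // y ∈ avail}) => pvAdjacent head x.1)
        avail.attach).unattach
      = avail.filter (fun node => pvAdjacent head node) :=
    pvFilterAttachUnattach avail (fun n => pvAdjacent head n)
  have h' : (List.filter (fun (x : {y // y ∈ avail}) => pvAdjacent head x.1)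
        avail.attach).unattach ≠ [] := h
  rw [e1] at h' ⊢
  have e2 : (List.filter (fun (x : {y // y ∈ avail}) =>
        !(avail.filter (fun node => pvAdjacent head node)).contains x.1)
        avail.attach).unattach
      = avail.filter (fun n =>
          !(avail.filter (fun node => pvAdjacent head node)).contains n) :=
    pvFilterAttachUnattach avail
      (fun n => !(avail.filter (fun node => pvAdjacent head node)).contains n)
  rw [e2]
  exact pvFilterNotMemLt _ _ (fun a ha => (List.mem_filter.mp ha).1) h'

theorem pvFoldlMaxZero (l : List Nat) (a : Nat) : l.foldl max a = max a (l.foldl max 0) := by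
  induction l generalizing a with
  | nil => simp
  | cons x t ih =>
    simp only [List.foldl_cons]
    rw [ih (max a x), ih (max 0 x)]
    omega

theorem pvFoldlMaxShift (x : Int) (t : List Int) (g : Int → Nat) (c b : Int) :
    (x :: t).foldl (fun acc n => max acc (c + (g n : Int))) b
      = max b (c + (((x :: t).map g).foldl max 0 : Nat)) := by
  induction t generalizing x b with
  | nil => simp
  | cons y u ih =>
    have hih := ih y (max b (c + (g x : Int)))
    simp only [List.foldl_cons, List.map_cons] at hih ⊢
    rw [hih]
    rw [pvFoldlMaxZero (List.map g u) (max 0 (g y)),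
        pvFoldlMaxZero (List.map g u) (max (max 0 (g x)) (g y))]
    push_cast
    omega

theorem pvMaxGetD (x : Int) (t : List Int) (c : Int) (g : Int → Nat) :
    ((PySem.List.max? ((x :: t).map (fun n => c + (g n : Int))) (fun y => y)).getD 0)
      = c + (((x :: t).map g).foldl max 0 : Nat) := by
  rw [List.map_cons, PySem.List.max?_id_cons]
  simp only [Option.getD_some]
  rw [List.foldl_map]
  cases t with
  | nil => simp
  | cons y u =>
    rw [pvFoldlMaxShift y u g c (c + (g x : Int))]
    simp only [List.map_cons, List.foldl_cons]
    rw [pvFoldlMaxZero (List.map g u) (max 0 (g y)),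
        pvFoldlMaxZero (List.map g u) (max (max 0 (g x)) (g y))]
    push_cast
    omega

theorem snake_eq_g : ∀ (n : Nat) (stack rem removals : List Int) (head : Int),
    (rem.filter (fun node => !removals.contains node)).length = n →
    PySem.List.pyGet? stack (-1) = some head →
    snake stack rem removals
      = (stack.length : Int) - 1
        + gsnake head (rem.filter (fun node => !removals.contains node)) := by
  intro n
  induction n using Nat.strong_induction_on with
  | _ n ih =>
    intro stack rem removals head hn hget
    rw [snake, gsnake]
    simp only [hget]
    set A := rem.filter (fun node => !removals.contains node) with hA
    set adjl := A.filter (fun node => pvAdjacent head node) with hadjdef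
    set A2 := A.filter (fun node => !adjl.contains node) with hA2
    by_cases hadj : adjl = []
    · rw [dif_pos hadj, dif_pos hadj]; simp
    · rw [dif_neg hadj, dif_neg hadj]
      have hlt : A2.length < n := by
        rw [← hn, hA2]
        exact pvFilterNotMemLt A adjl
          (fun a ha => (List.mem_filter.mp (hadjdef ▸ ha)).1) hadj
      have hmap : adjl.map (fun node => snake (stack ++ [node]) A adjl)
          = adjl.map (fun node => (stack.length : Int) + (gsnake node A2 : Nat)) := by
        apply List.map_congr_left
        intro node _hmem
        rw [ih A2.length hlt (stack ++ [node]) A adjl node (by rw [hA2]) 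
          (PySem.List.pyGet?_neg_one_append_singleton stack node)]
        rw [← hA2]
        push_cast [List.length_append, List.length_singleton]
        ring
      rw [hmap]
      obtain ⟨x, t, hxt⟩ : ∃ x t, adjl = x :: t := by
        rcases adjl with _ | ⟨x, t⟩
        · exact absurd rfl hadj
        · exact ⟨x, t, rfl⟩
      rw [hxt]
      rw [pvMaxGetD x t (stack.length : Int) (fun node => gsnake node A2)]
      push_cast
      ring

theorem snakeLoop_eq : ∀ (n : Nat) (frames : List (Int × List Int × Int)) (best : Int),
    (frames.map (fun f => 2 ^ f.2.1.length)).sum = n →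
    snakeLoop frames best
      = frames.foldl (fun acc f => max acc (f.2.2 + (gsnake f.1 f.2.1 : Int))) best := by
  intro n
  induction n using Nat.strong_induction_on with
  | _ n ih =>
    intro frames best hn
    match frames with
    | [] => rw [snakeLoop]; rfl
    | (head, avail, depth) :: rest =>
      rw [snakeLoop]
      set adjl := avail.filter (fun node => pvAdjacent head node) with hadjdef
      by_cases hadj : adjl = []
      · rw [dif_pos hadj]
        have hlt : (rest.map (fun f => 2 ^ f.2.1.length)).sum < n := by
          rw [← hn]
          have := Nat.two_pow_pos avail.length
          simp only [List.map_cons, List.sum_cons]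
          omega
        rw [ih _ hlt rest (max best depth) rfl]
        have hg : gsnake head avail = 0 := by
          rw [gsnake, dif_pos (by rw [← hadjdef]; exact hadj)]
        simp [hg]
      · rw [dif_neg hadj]
        set NA := avail.filter (fun node => !adjl.contains node) with hNA
        have key := pvBranchLt avail (fun node => pvAdjacent head node) (hadjdef ▸ hadj)
        rw [← hadjdef, ← hNA] at key
        have hconst : (List.map ((fun (f : Int × List Int × Int) => 2 ^ f.2.1.length) ∘
              (fun node => (node, NA, depth + 1))) adjl).sum
            = adjl.length * 2 ^ NA.length := by
          simp [Function.comp_def]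
        have hlt : (((adjl.map (fun node => (node, NA, depth + 1))).reverse ++ rest).map
            (fun f => 2 ^ f.2.1.length)).sum < n := by
          rw [← hn]
          simp only [List.map_append, List.sum_append, List.map_reverse, List.sum_reverse,
            List.map_map, List.map_cons, List.sum_cons, hconst]
          omega
        rw [ih _ hlt _ best rfl]
        rw [List.foldl_append]
        have hrev : ((adjl.map (fun node => (node, NA, depth + 1))).reverse).foldl
              (fun acc f => max acc (f.2.2 + (gsnake f.1 f.2.1 : Int))) best
            = (adjl.map (fun node => (node, NA, depth + 1))).foldl
              (fun acc f => max acc (f.2.2 + (gsnake f.1 f.2.1 : Int))) best := by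
          have hrcomm : RightCommutative (fun (acc : Int) (f : Int × List Int × Int) =>
              max acc (f.2.2 + (gsnake f.1 f.2.1 : Int))) :=
            ⟨fun b x y => max_right_comm b _ _⟩
          exact List.Perm.foldl_eq (rcomm := hrcomm) (List.reverse_perm _) best
        rw [hrev, List.foldl_map]
        obtain ⟨x, t, hxt⟩ : ∃ x t, adjl = x :: t := by
          rcases adjl with _ | ⟨x, t⟩
          · exact absurd rfl hadj
          · exact ⟨x, t, rfl⟩
        have hg : gsnake head avail
            = 1 + ((adjl.map (fun node => gsnake node NA)).foldl max 0) := by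
          rw [gsnake, dif_neg (by rw [← hadjdef]; exact hadj)]
        simp only [List.foldl_cons]
        rw [hg, hxt]
        rw [pvFoldlMaxShift x t (fun node => gsnake node NA) (depth + 1) best]
        have harith : max best ((depth + 1) + (((x :: t).map (fun node => gsnake node NA)).foldl max 0 : Nat))
            = max best (depth + ((1 + (((x :: t).map (fun node => gsnake node NA)).foldl max 0) : Nat) : Int)) := by
          push_cast
          omega
        rw [harith]

-- ===== VERDICT (by name: the statement is the Claim_ definition above) =====
theorem snake_spec : Claim_equal_snake := by
  unfold Claim_equal_snake
  intro stack rem removals _dom hpre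
  unfold Pre_snake at hpre
  unfold Spec_snake
  obtain ⟨head, hget⟩ : ∃ head, PySem.List.pyGet? stack (-1) = some head := by
    rw [PySem.List.pyGet?_neg_one]
    exact Option.isSome_iff_exists.mp (List.getLast?_isSome.mpr hpre)
  rw [snake_eq_g _ stack rem removals head rfl hget]
  unfold snake_alt
  simp only [hget]
  rw [snakeLoop_eq _ _ _ rfl]
  simp only [List.foldl_cons, List.foldl_nil]
  omega
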